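-- pv_equiv track=rewrite | github.com/sderose/PYTHONLIBS | sjdUtils.py | splitPlus
-- ===== SOURCE A (Python) =====
-- def splitPlus(st, delim=" ", esc="\\", unbackslash=False, empties=True):
--     """Basically the same as string split(), but supports backslashing
--     the delimiter, and discarding empty tokens.
--     Does NOT decode backslash/escape codes by default.
--     TODO: Add support for multi-char delimiters.
--     """
--     assert (len(delim) == 1)
--     assert (len(esc) <= 1)
--     tokens = []
--     token = ""
--     gotEscape = False
--     for ch in st:
--         if (gotEscape):
--             token += ch
--             gotEscape = False
--         elif (ch == esc):
--             token += ch
--             gotEscape = True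
--         elif (ch == delim):
--             if (token!='' or empties): tokens.append(token)
--             token = ""
--         else:
--             token += ch
--     if (token != ''):
--         tokens.append(token)
--     if (unbackslash):
--         for i, token in enumerate(tokens):
--             tokens[i] = token.decode('string_escape')
--     return tokens
-- ===== SOURCE B (Python) =====
-- def splitPlus(st, delim=" ", esc="\\", unbackslash=False, empties=True):
--     """Split st on delim with esc support, as a two-phase split-then-merge:
--     split first, then glue adjacent pieces back whenever the accumulated
--     token ends in an odd run of esc characters (i.e. the delimiter was
--     escaped).  A delimiter equal to esc is itself an escape, so then every
--     boundary is escaped.  The Python-2 'unbackslash' decode loop (dead under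
--     Python 3) is dropped.  Escape characters are kept literally, as in the
--     original.
--     """
--     assert (len(delim) == 1)
--     assert (len(esc) <= 1)
--     pieces = st.split(delim)
--     tokens = []
--     acc = pieces[0]
--     for p in pieces[1:]:
--         n = 0
--         for ch in reversed(acc):
--             if ch != esc:
--                 break
--             n += 1
--         if esc and (esc == delim or n % 2 == 1):
--             acc = acc + delim + p
--         else:
--             if acc != '' or empties:
--                 tokens.append(acc)
--             acc = p
--     if acc != '':
--         tokens.append(acc)
--     return tokens
-- ===== Notes on version B (the rewrite author's own statement) =====
-- stated objective: alternative
-- what changed: Replaces A's char-by-char escape state machine with a two-phase split-then-merge: st.split(delim) first, then adjacent pieces are re-glued (re-inserting delim) whenever the boundary delimiter was escaped (odd trailing run of esc, or esc == delim); the dead Python-3 'unbackslash' decode loop is dropped.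
import Mathlib
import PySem

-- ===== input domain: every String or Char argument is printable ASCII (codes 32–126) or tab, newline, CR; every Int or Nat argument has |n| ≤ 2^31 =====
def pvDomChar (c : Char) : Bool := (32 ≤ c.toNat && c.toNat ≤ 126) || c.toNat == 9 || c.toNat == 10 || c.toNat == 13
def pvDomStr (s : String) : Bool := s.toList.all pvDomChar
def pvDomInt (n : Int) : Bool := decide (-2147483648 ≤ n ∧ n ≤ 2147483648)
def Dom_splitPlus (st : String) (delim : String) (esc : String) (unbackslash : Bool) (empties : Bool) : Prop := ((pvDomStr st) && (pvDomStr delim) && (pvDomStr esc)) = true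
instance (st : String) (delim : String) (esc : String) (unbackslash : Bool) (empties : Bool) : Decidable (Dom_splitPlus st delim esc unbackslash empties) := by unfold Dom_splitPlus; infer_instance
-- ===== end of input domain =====

-- B replaces A's char-by-char escape state machine with split-then-merge (split on delim,
-- re-glue pieces after an odd trailing run of esc) and drops the dead Python-3 unbackslash loop.


-- ===== PORT A =====
-- A's loop body: state = (tokens, token, gotEscape), one Python iteration per char.
def spStepA (delimL escL : List Char) (empties : Bool)
    (s : List (List Char) × List Char × Bool) (ch : Char) :
    List (List Char) × List Char × Bool :=
  if s.2.2 then (s.1, s.2.1 ++ [ch], false)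
  else if [ch] = escL then (s.1, s.2.1 ++ [ch], true)
  else if [ch] = delimL then
    ((if !s.2.1.isEmpty || empties then s.1 ++ [s.2.1] else s.1), [], false)
  else (s.1, s.2.1 ++ [ch], false)

def splitPlus (st : String) (delim : String) (esc : String) (unbackslash : Bool) (empties : Bool) : List String :=
  let s := st.toList.foldl (spStepA delim.toList esc.toList empties) ([], [], false)
  let tokens := if !s.2.1.isEmpty then s.1 ++ [s.2.1] else s.1
  -- Python's final 'unbackslash' loop calls token.decode('string_escape'), which in Python 3
  -- raises AttributeError whenever tokens ≠ []; Pre_splitPlus requires unbackslash = false.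
  tokens.map String.mk

-- ===== PORT B =====
-- trailing run of esc characters at the end of acc (Source B's reversed-scan counter)
def spTrail (e : Char) (acc : List Char) : Nat := (acc.reverse.takeWhile (· == e)).length

-- Source B's 'esc and (esc == delim or n % 2 == 1)' (esc has length ≤ 1 under the assert):
-- the boundary delimiter was escaped
def spCond (delimL escL : List Char) (acc : List Char) : Bool :=
  match escL with
  | [e] => delimL == [e] || spTrail e acc % 2 == 1
  | _ => false

-- Source B's merge loop body: state = (tokens, acc), one iteration per remaining piece
def spStepB (delimL escL : List Char) (empties : Bool)
    (s : List (List Char) × List Char) (p : List Char) : List (List Char) × List Char :=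
  if spCond delimL escL s.2 then (s.1, s.2 ++ delimL ++ p)
  else ((if !s.2.isEmpty || empties then s.1 ++ [s.2] else s.1), p)

def splitPlus_alt (st : String) (delim : String) (esc : String) (unbackslash : Bool) (empties : Bool) : List String :=
  match PySem.Chars.splitOn st.toList delim.toList with
  | [] => []   -- unreachable: str.split never returns an empty list
  | p0 :: ps =>
    let s := ps.foldl (spStepB delim.toList esc.toList empties) ([], p0)
    (if !s.2.isEmpty then s.1 ++ [s.2] else s.1).map String.mk

-- ===== PRECONDITION & SPEC =====
-- Pre_ excludes: inputs failing A's asserts (multi-char delim, esc longer than 1), and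
-- unbackslash = true inputs on which A raises AttributeError (Python 3 str has no .decode) —
-- i.e. whenever any token is produced; the no-token cases (empty st, or empties = false with
-- st consisting only of unescaped delimiters), where A returns [], stay inside Pre_.
def Pre_splitPlus (st : String) (delim : String) (esc : String) (unbackslash : Bool) (empties : Bool) : Prop :=
  delim.toList.length = 1 ∧ esc.toList.length ≤ 1 ∧
  (unbackslash = false ∨ st = "" ∨
    (empties = false ∧ esc.toList ≠ delim.toList ∧ ∀ c ∈ st.toList, [c] = delim.toList))
instance (st : String) (delim : String) (esc : String) (unbackslash : Bool) (empties : Bool) : Decidable (Pre_splitPlus st delim esc unbackslash empties) := by unfold Pre_splitPlus; infer_instance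

def pvWitness_splitPlus : String × String × String × Bool × Bool := ("a\\ b c", " ", "\\", false, true)

def Spec_splitPlus (st : String) (delim : String) (esc : String) (unbackslash : Bool) (empties : Bool) (out : List String) : Prop := out = splitPlus_alt st delim esc unbackslash empties
instance (st : String) (delim : String) (esc : String) (unbackslash : Bool) (empties : Bool) (out : List String) : Decidable (Spec_splitPlus st delim esc unbackslash empties out) := by unfold Spec_splitPlus; infer_instance

-- ===== CLAIM (what is proved, stated in full; the proofs are below) =====
def Claim_equal_splitPlus : Prop := ∀ (st : String) (delim : String) (esc : String) (unbackslash : Bool) (empties : Bool), Dom_splitPlus st delim esc unbackslash empties → Pre_splitPlus st delim esc unbackslash empties → Spec_splitPlus st delim esc unbackslash empties (splitPlus st delim esc unbackslash empties)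

-- ===== LEMMAS AND PROOFS =====

-- A's gotEscape flag as a function of the accumulated token: odd trailing run of esc
def spEscOdd (escL : List Char) (acc : List Char) : Bool :=
  match escL with
  | [e] => spTrail e acc % 2 == 1
  | _ => false

-- simple reference recursion for single-char split: spRef d pre cs = split of (pre ++ cs)
-- whose first piece is glued onto pre
def spRef (d : Char) : List Char → List Char → List (List Char)
  | pre, [] => [pre]
  | pre, c :: cs => if c = d then pre :: spRef d [] cs else spRef d (pre ++ [c]) cs

theorem spRef_ne_nil (d : Char) (pre cs : List Char) : spRef d pre cs ≠ [] := by
  induction cs generalizing pre with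
  | nil => simp [spRef]
  | cons c cs ih => by_cases h : c = d <;> simp [spRef, h, ih]

theorem go_eq (d : Char) (l : List Char) (fuel : Nat) (h : l.length ≤ fuel)
    (cur acc : List Char) (accs : List (List Char)) :
    PySem.Chars.splitOn.go [d] fuel l cur accs = accs.reverse ++ spRef d cur.reverse l := by
  induction l generalizing fuel cur accs with
  | nil =>
    cases fuel <;> simp [PySem.Chars.splitOn.go, spRef]
  | cons c cs ih =>
    cases fuel with
    | zero => simp at h
    | succ f =>
      simp only [PySem.Chars.splitOn.go]
      by_cases hc : c = d
      · subst hc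
        rw [if_pos (by simp [List.isPrefixOf])]
        rw [show List.drop [c].length (c :: cs) = cs by simp]
        rw [ih f (by simpa using h) [] (cur.reverse :: accs)]
        simp [spRef]
      · rw [if_neg (by simp [List.isPrefixOf, Ne.symm hc])]
        rw [ih f (by simpa using h) (c :: cur) accs]
        simp [spRef, hc]


theorem splitOn_eq (d : Char) (l : List Char) :
    PySem.Chars.splitOn l [d] = spRef d [] l := by
  unfold PySem.Chars.splitOn
  simpa using go_eq d l (l.length + 1) (by omega) [] [] []

-- spRef with a nonempty prefix just glues the prefix onto the head piece
theorem spRef_pre (d : Char) (cs : List Char) (pre : List Char) :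
    spRef d pre cs = (spRef d [] cs).modifyHead (pre ++ ·) := by
  induction cs generalizing pre with
  | nil => simp [spRef]
  | cons c cs ih =>
    by_cases h : c = d
    · simp [spRef, h]
    · simp only [spRef, if_neg h]
      rw [ih (pre ++ [c])]
      simp only [List.nil_append]
      rw [ih [c]]
      cases hs : spRef d [] cs with
      | nil => exact absurd hs (spRef_ne_nil d [] cs)
      | cons q qs => simp

theorem spTrail_append (e : Char) (acc : List Char) (c : Char) :
    spTrail e (acc ++ [c]) = if c = e then spTrail e acc + 1 else 0 := by
  unfold spTrail
  rw [List.reverse_append]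
  by_cases h : c = e <;> simp [h]

-- the merge phase of B, started mid-way: tokens already emitted, current acc, rest of the raw
-- string cs (directly continuing acc, no delimiter in between)
def mergeFrom (d : Char) (escL : List Char) (empties : Bool)
    (tokens : List (List Char)) (acc cs : List Char) : List (List Char) :=
  match spRef d [] cs with
  | [] => []
  | p0 :: ps =>
    let s := ps.foldl (spStepB [d] escL empties) (tokens, acc ++ p0)
    if !s.2.isEmpty then s.1 ++ [s.2] else s.1

theorem mergeFrom_cons_ne (d : Char) (escL : List Char) (empties : Bool)
    (tokens : List (List Char)) (acc cs : List Char) (c : Char) (h : c ≠ d) :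
    mergeFrom d escL empties tokens acc (c :: cs) = mergeFrom d escL empties tokens (acc ++ [c]) cs := by
  unfold mergeFrom
  rw [show spRef d [] (c :: cs) = spRef d [c] cs by simp [spRef, h]]
  rw [spRef_pre d cs [c]]
  cases hs : spRef d [] cs with
  | nil => exact absurd hs (spRef_ne_nil d [] cs)
  | cons q qs => simp

theorem mergeFrom_cons_d (d : Char) (escL : List Char) (empties : Bool)
    (tokens : List (List Char)) (acc cs : List Char) :
    mergeFrom d escL empties tokens acc (d :: cs) =
      if spCond [d] escL acc then mergeFrom d escL empties tokens (acc ++ [d]) cs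
      else mergeFrom d escL empties
        (if !acc.isEmpty || empties then tokens ++ [acc] else tokens) [] cs := by
  unfold mergeFrom
  rw [show spRef d [] (d :: cs) = [] :: spRef d [] cs by simp [spRef]]
  cases hs : spRef d [] cs with
  | nil => exact absurd hs (spRef_ne_nil d [] cs)
  | cons q qs =>
    simp only [List.foldl_cons, List.append_nil, spStepB]
    by_cases h : spCond [d] escL acc <;> simp [h]

def finA (s : List (List Char) × List Char × Bool) : List (List Char) :=
  if !s.2.1.isEmpty then s.1 ++ [s.2.1] else s.1

-- the main invariant: A's state machine from (tokens, acc, parity of acc) equals B's merge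
theorem spMain (d : Char) (escL : List Char) (empties : Bool)
    (hE : escL = [] ∨ ∃ e, escL = [e]) :
    ∀ (cs : List Char) (tokens : List (List Char)) (acc : List Char) (ge : Bool),
    ge = spEscOdd escL acc →
    finA (cs.foldl (spStepA [d] escL empties) (tokens, acc, ge))
      = mergeFrom d escL empties tokens acc cs := by
  intro cs
  induction cs with
  | nil =>
    intro tokens acc ge _
    simp only [List.foldl_nil, mergeFrom, spRef, List.foldl_nil, List.append_nil, finA]
  | cons c cs ih =>
    intro tokens acc ge hge
    simp only [List.foldl_cons]
    by_cases hcd : c = d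
    · subst hcd
      rw [mergeFrom_cons_d]
      by_cases hcond : spCond [c] escL acc
      · rw [if_pos hcond]
        obtain ⟨e, he⟩ : ∃ e, escL = [e] := by
          rcases hE with h0 | he
          · rw [h0] at hcond; simp [spCond] at hcond
          · exact he
        subst he
        by_cases hodd : spEscOdd [e] acc
        · -- gotEscape: the delimiter is consumed literally
          rw [show spStepA [c] [e] empties (tokens, acc, ge) c = (tokens, acc ++ [c], false) by
            simp [spStepA, hge, hodd]]
          refine ih tokens (acc ++ [c]) false ?_
          by_cases hce : c = e
          · subst hce
            have h1 : spTrail c acc % 2 = 1 := by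
              have := hodd; simp [spEscOdd] at this; omega
            simp [spEscOdd, spTrail_append]
            omega
          · simp [spEscOdd, spTrail_append, hce]
        · -- esc = delim: the delimiter is itself an escape character
          have hde : c = e := by
            have h' := hcond
            simp [spCond] at h'
            rcases h' with h' | h'
            · exact h'
            · exact absurd (by simp [spEscOdd, h']) hodd
          subst hde
          rw [show spStepA [c] [c] empties (tokens, acc, ge) c = (tokens, acc ++ [c], true) by
            simp [spStepA, hge, hodd]]
          refine ih tokens (acc ++ [c]) true ?_
          have h0' : spTrail c acc % 2 = 0 := by
            have := hodd; simp [spEscOdd] at this; omega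
          simp [spEscOdd, spTrail_append]
          omega
      · rw [if_neg hcond]
        have hodd : spEscOdd escL acc = false := by
          rcases hE with h0 | ⟨e, he⟩
          · subst h0; rfl
          · subst he
            have h' := hcond
            simp [spCond] at h'
            simp [spEscOdd, h'.2]
        have hce : [c] ≠ escL := by
          rcases hE with h0 | ⟨e, he⟩
          · subst h0; simp
          · subst he
            intro h
            exact hcond (by simp [spCond, (by simpa using h : c = e)])
        rw [show spStepA [c] escL empties (tokens, acc, ge) c
            = ((if !acc.isEmpty || empties then tokens ++ [acc] else tokens), [], false) by
          simp [spStepA, hge, hodd, hce]]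
        refine ih _ [] false ?_
        rcases hE with h0 | ⟨e, he⟩
        · subst h0; rfl
        · subst he; rfl
    · rw [mergeFrom_cons_ne d escL empties tokens acc cs c hcd]
      by_cases hodd : spEscOdd escL acc
      · rw [show spStepA [d] escL empties (tokens, acc, ge) c = (tokens, acc ++ [c], false) by
          simp [spStepA, hge, hodd]]
        refine ih tokens (acc ++ [c]) false ?_
        rcases hE with h0 | ⟨e, he⟩
        · subst h0; rfl
        · subst he
          by_cases hcde : c = e
          · subst hcde
            have h1 : spTrail c acc % 2 = 1 := by
              have := hodd; simp [spEscOdd] at this; omega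
            simp [spEscOdd, spTrail_append]
            omega
          · simp [spEscOdd, spTrail_append, hcde]
      · by_cases hce : [c] = escL
        · rw [show spStepA [d] escL empties (tokens, acc, ge) c = (tokens, acc ++ [c], true) by
            simp [spStepA, hge, hodd, hce]]
          refine ih tokens (acc ++ [c]) true ?_
          rcases hE with h0 | ⟨e, he⟩
          · rw [h0] at hce; simp at hce
          · subst he
            have hc : c = e := by simpa using hce
            subst hc
            have h0' : spTrail c acc % 2 = 0 := by
              have := hodd; simp [spEscOdd] at this; omega
            simp [spEscOdd, spTrail_append]
            omega
        · rw [show spStepA [d] escL empties (tokens, acc, ge) c = (tokens, acc ++ [c], false) by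
            simp [spStepA, hge, hodd, hce, hcd]]
          refine ih tokens (acc ++ [c]) false ?_
          rcases hE with h0 | ⟨e, he⟩
          · subst h0; rfl
          · subst he
            have hce' : c ≠ e := fun h => hce (by rw [h])
            simp [spEscOdd, spTrail_append, hce']

-- ===== VERDICT (by name: the statement is the Claim_ definition above) =====
theorem splitPlus_spec : Claim_equal_splitPlus := by
  intro st delim esc unbackslash empties _hDom hPre
  obtain ⟨hd, he, -⟩ := hPre
  obtain ⟨d, hdel⟩ : ∃ d, delim.toList = [d] := by
    cases h : delim.toList with
    | nil => rw [h] at hd; simp at hd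
    | cons a l =>
      rw [h] at hd
      cases l with
      | nil => exact ⟨a, rfl⟩
      | cons b l' => simp at hd
  have hE : esc.toList = [] ∨ ∃ e, esc.toList = [e] := by
    cases h : esc.toList with
    | nil => exact Or.inl rfl
    | cons a l =>
      rw [h] at he
      cases l with
      | nil => exact Or.inr ⟨a, rfl⟩
      | cons b l' => simp at he
  have h0 : spEscOdd esc.toList ([] : List Char) = false := by
    rcases hE with h0 | ⟨e, hee⟩
    · rw [h0]; rfl
    · rw [hee]; rfl
  have hmain := spMain d esc.toList empties hE st.toList [] [] false h0.symm
  show splitPlus st delim esc unbackslash empties = splitPlus_alt st delim esc unbackslash empties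
  simp only [splitPlus, splitPlus_alt]
  rw [hdel, splitOn_eq d st.toList]
  simp only [finA] at hmain
  rw [hmain]
  unfold mergeFrom
  cases hs : spRef d [] st.toList with
  | nil => exact absurd hs (spRef_ne_nil d [] st.toList)
  | cons p0 ps => simp
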